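-- pv_equiv track=rewrite | github.com/NickyBoy89/java2go | gowriter.py | toGoArgs
-- ===== SOURCE A (Python) =====
-- def toGoArgs(args, combine=True):
--     result = ""
--
--     for arg in enumerate(args):
--         # Look ahead at the next arg and see if it has the same arg
--         if arg[0] < len(args) - 1 and args[arg[0] + 1]["type"] == arg[1]["type"] and combine:
--             result += f'{arg[1]["name"]}'
--         else:
--             result += f'{arg[1]["name"]} {arg[1]["type"]}'
--
--         # Lart arg, don't print a comma
--         if arg[0] != len(args) - 1:
--             result += ", "
--
--     return result
-- ===== SOURCE B (Python) =====
-- def toGoArgs(args, combine=True):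
--     # Build explicit runs: one (type, [names]) group per maximal run of equal
--     # consecutive types (every arg is its own group when combine is False),
--     # then format each group as "n1, n2 type" and join the groups.
--     groups = []
--     for arg in args:
--         if combine and groups and groups[-1][0] == arg["type"]:
--             groups[-1] = (arg["type"], groups[-1][1] + [arg["name"]])
--         else:
--             groups.append((arg["type"], [arg["name"]]))
--     return ", ".join(", ".join(names) + " " + t for t, names in groups)
-- ===== Notes on version B (the rewrite author's own statement) =====
-- stated objective: alternative
-- what changed: A's single pass with index look-ahead and per-arg comma logic is replaced by a two-phase decomposition: first materialize explicit (type, names) run groups, then format each group and join; Pre_ excludes args missing a 'name' or 'type' key, on which A raises KeyError.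
import Mathlib
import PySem

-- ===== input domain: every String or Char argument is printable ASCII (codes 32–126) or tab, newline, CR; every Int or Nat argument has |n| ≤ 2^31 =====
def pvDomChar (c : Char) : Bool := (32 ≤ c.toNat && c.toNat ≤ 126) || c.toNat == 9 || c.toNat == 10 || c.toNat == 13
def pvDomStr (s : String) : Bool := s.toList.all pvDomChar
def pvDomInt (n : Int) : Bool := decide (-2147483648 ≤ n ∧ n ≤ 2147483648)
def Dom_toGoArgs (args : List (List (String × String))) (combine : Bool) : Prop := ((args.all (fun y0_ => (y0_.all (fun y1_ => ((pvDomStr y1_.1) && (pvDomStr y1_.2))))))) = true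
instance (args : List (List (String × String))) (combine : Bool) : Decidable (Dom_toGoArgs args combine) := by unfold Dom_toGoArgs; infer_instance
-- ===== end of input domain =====

-- B replaces A's index-look-ahead single pass by an explicit build-run-groups-then-format decomposition (same cost).

-- ===== PORT A =====
-- dict access d[k] (first-match association-list lookup); a missing key raises KeyError in
-- Python, which Pre_toGoArgs excludes, so the default "" is never reached under Pre_.
def argGet (d : List (String × String)) (k : String) : String :=
  (d.lookup k).getD ""

-- the body of A's for-loop over enumerate(args): look-ahead comparison, then the comma rule
def stepA (args : List (List (String × String))) (combine : Bool)
    (result : String) (arg : Int × List (String × String)) : String :=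
  let result := result ++
    (if decide (arg.1 < (args.length : Int) - 1)
        && (argGet (PySem.List.pyGetD args (arg.1 + 1) []) "type" == argGet arg.2 "type")
        && combine
     then argGet arg.2 "name"
     else argGet arg.2 "name" ++ " " ++ argGet arg.2 "type")
  if arg.1 != (args.length : Int) - 1 then result ++ ", " else result

def toGoArgs (args : List (List (String × String))) (combine : Bool) : String :=
  (PySem.List.enumerate args).foldl (stepA args combine) ""

-- ===== PORT B =====
-- one step of B's loop: extend the last run group or start a new one (groups[-1] update / append)
def goStep (combine : Bool) (groups : List (String × List String))
    (a : List (String × String)) : List (String × List String) :=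
  match groups.getLast? with
  | some (t', ns) =>
    if combine && (t' == argGet a "type")
    then groups.dropLast ++ [(argGet a "type", ns ++ [argGet a "name"])]
    else groups ++ [(argGet a "type", [argGet a "name"])]
  | none => groups ++ [(argGet a "type", [argGet a "name"])]

def toGoArgs_alt (args : List (List (String × String))) (combine : Bool) : String :=
  let groups := args.foldl (goStep combine) []
  PySem.Str.join ", " (groups.map (fun g => PySem.Str.join ", " g.2 ++ " " ++ g.1))

-- ===== PRECONDITION & SPEC =====
-- Pre_ excludes exactly the inputs on which A raises KeyError: some argument dict
-- without a "name" key or without a "type" key.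
def Pre_toGoArgs (args : List (List (String × String))) (combine : Bool) : Prop :=
  (args.all (fun a => (a.lookup "name").isSome && (a.lookup "type").isSome)) = true
instance (args : List (List (String × String))) (combine : Bool) : Decidable (Pre_toGoArgs args combine) := by unfold Pre_toGoArgs; infer_instance

def pvWitness_toGoArgs : (List (List (String × String))) × Bool :=
  ([[("name", "x"), ("type", "int")], [("name", "y"), ("type", "int")], [("name", "s"), ("type", "str")]], true)

def Spec_toGoArgs (args : List (List (String × String))) (combine : Bool) (out : String) : Prop := out = toGoArgs_alt args combine
instance (args : List (List (String × String))) (combine : Bool) (out : String) : Decidable (Spec_toGoArgs args combine out) := by unfold Spec_toGoArgs; infer_instance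

-- ===== CLAIM (what is proved, stated in full; the proofs are below) =====
def Claim_equal_toGoArgs : Prop := ∀ (args : List (List (String × String))) (combine : Bool), Dom_toGoArgs args combine → Pre_toGoArgs args combine → Spec_toGoArgs args combine (toGoArgs args combine)

-- ===== LEMMAS AND PROOFS =====

-- common recursive characterization of both programs' output
def recA (combine : Bool) : List (List (String × String)) → String
  | [] => ""
  | [a] => argGet a "name" ++ " " ++ argGet a "type"
  | a :: b :: xs =>
    (if (argGet b "type" == argGet a "type") && combine
     then argGet a "name"
     else argGet a "name" ++ " " ++ argGet a "type")
    ++ ", " ++ recA combine (b :: xs)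

-- structural (right-to-left) run grouping, the proof-side mirror of B's left fold
def goGroups (combine : Bool) : List (List (String × String)) → List (String × List String)
  | [] => []
  | a :: rest =>
    match goGroups combine rest with
    | (t', ns) :: gs' =>
      if combine && (t' == argGet a "type")
      then (argGet a "type", argGet a "name" :: ns) :: gs'
      else (argGet a "type", [argGet a "name"]) :: (t', ns) :: gs'
    | [] => [(argGet a "type", [argGet a "name"])]

theorem join_cons_cons (s x y : String) (r : List String) :
    PySem.Str.join s (x :: y :: r) = x ++ s ++ PySem.Str.join s (y :: r) := by
  simp [PySem.Str.join, PySem.Chars.join, List.intercalate, String.append_assoc]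

theorem join_singleton (s x : String) : PySem.Str.join s [x] = x := by
  simp [PySem.Str.join, PySem.Chars.join, List.intercalate]

theorem foldA (combine : Bool) :
    ∀ (xs pre : List (List (String × String))) (acc : String),
      (PySem.List.enumerate xs (pre.length : Int)).foldl (stepA (pre ++ xs) combine) acc
        = acc ++ recA combine xs := by
  intro xs
  induction xs with
  | nil => intro pre acc; simp [PySem.List.enumerate, recA]
  | cons a xs ih =>
    intro pre acc
    rw [PySem.List.enumerate_cons]
    simp only [List.foldl_cons]
    cases xs with
    | nil =>
      simp [stepA, PySem.List.enumerate, recA, String.append_assoc]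
    | cons b xs' =>
      have hc1 : ((pre.length : Int) < ((pre ++ a :: b :: xs').length : Int) - 1) := by
        simp; omega
      have hc2 : ((pre.length : Int) ≠ ((pre ++ a :: b :: xs').length : Int) - 1) := by
        simp; omega
      have hget : PySem.List.pyGetD (pre ++ a :: b :: xs') ((pre.length : Int) + 1) [] = b := by
        have : ((pre.length : Int) + 1) = ((pre.length + 1 : Nat) : Int) := by push_cast; ring
        rw [this, PySem.List.pyGetD_natCast]
        have : pre.length + 1 < (pre ++ a :: b :: xs').length := by simp
        rw [List.getD_eq_getElem _ _ this]
        simp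
      have hstep : stepA (pre ++ a :: b :: xs') combine acc ((pre.length : Int), a)
          = acc ++ ((if (argGet b "type" == argGet a "type") && combine
                     then argGet a "name"
                     else argGet a "name" ++ " " ++ argGet a "type") ++ ", ") := by
        simp only [stepA, hget, bne_iff_ne, ne_eq, hc2, not_false_eq_true, if_true,
          hc1, decide_true, Bool.true_and]
        split <;> simp [String.append_assoc]
      rw [hstep]
      have hpre : ((pre.length : Int) + 1) = (((pre ++ [a]).length : Nat) : Int) := by
        simp
      have hargs : pre ++ a :: b :: xs' = (pre ++ [a]) ++ b :: xs' := by simp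
      rw [hpre, hargs, ih (pre ++ [a])]
      simp [recA, String.append_assoc]

theorem toGoArgs_eq_recA (args : List (List (String × String))) (combine : Bool) :
    toGoArgs args combine = recA combine args := by
  have h := foldA combine args [] ""
  simpa [toGoArgs] using h

theorem goGroups_cons (combine : Bool) (a : List (String × String)) (rest : List (List (String × String))) :
    goGroups combine (a :: rest) =
      match goGroups combine rest with
      | (t', ns) :: gs' =>
        if combine && (t' == argGet a "type")
        then (argGet a "type", argGet a "name" :: ns) :: gs'
        else (argGet a "type", [argGet a "name"]) :: (t', ns) :: gs'
      | [] => [(argGet a "type", [argGet a "name"])] := rfl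

theorem join_nil (s : String) : PySem.Str.join s [] = "" := by
  simp [PySem.Str.join, PySem.Chars.join, List.intercalate]

theorem goGroups_head (combine : Bool) (b : List (String × String)) (ys : List (List (String × String))) :
    ∃ ns G', goGroups combine (b :: ys) = (argGet b "type", ns) :: G' ∧ ns ≠ [] := by
  cases combine with
  | false =>
    cases hG : goGroups false ys with
    | nil => exact ⟨[argGet b "name"], [], by rw [goGroups_cons, hG], by simp⟩
    | cons g G' =>
      obtain ⟨t, ms⟩ := g
      exact ⟨[argGet b "name"], (t, ms) :: G', by rw [goGroups_cons, hG]; simp, by simp⟩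
  | true =>
    cases hG : goGroups true ys with
    | nil => exact ⟨[argGet b "name"], [], by rw [goGroups_cons, hG], by simp⟩
    | cons g G' =>
      obtain ⟨t, ms⟩ := g
      by_cases ht : t = argGet b "type"
      · exact ⟨argGet b "name" :: ms, G', by rw [goGroups_cons, hG]; simp [ht], by simp⟩
      · exact ⟨[argGet b "name"], (t, ms) :: G', by rw [goGroups_cons, hG]; simp [ht], by simp⟩

theorem format_merge (t n : String) (ns : List String) (G : List (String × List String)) (hne : ns ≠ []) :
    PySem.Str.join ", " (((t, n :: ns) :: G).map (fun g => PySem.Str.join ", " g.2 ++ " " ++ g.1))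
      = n ++ ", " ++ PySem.Str.join ", " (((t, ns) :: G).map (fun g => PySem.Str.join ", " g.2 ++ " " ++ g.1)) := by
  cases ns with
  | nil => exact absurd rfl hne
  | cons m ms =>
    cases G with
    | nil => simp [join_singleton, join_cons_cons, String.append_assoc]
    | cons g' G'' => simp [join_cons_cons, String.append_assoc]

theorem join_cons_ne_nil (s x : String) (L : List String) (h : L ≠ []) :
    PySem.Str.join s (x :: L) = x ++ s ++ PySem.Str.join s L := by
  cases L with
  | nil => exact absurd rfl h
  | cons y r => exact join_cons_cons s x y r

theorem foldB_run (combine : Bool) :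
    ∀ (xs : List (List (String × String))) (gs0 : List (String × List String))
      (t' : String) (ns' : List String),
      xs.foldl (goStep combine) (gs0 ++ [(t', ns')]) =
        gs0 ++ (match goGroups combine xs with
                | (t, ms) :: G' =>
                  if combine && (t == t') then (t', ns' ++ ms) :: G'
                  else (t', ns') :: (t, ms) :: G'
                | [] => [(t', ns')]) := by
  intro xs
  induction xs with
  | nil => intro gs0 t' ns'; simp [goGroups]
  | cons a xs ih =>
    intro gs0 t' ns'
    simp only [List.foldl_cons]
    have hstep : goStep combine (gs0 ++ [(t', ns')]) a =
        if combine && (t' == argGet a "type")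
        then gs0 ++ [(argGet a "type", ns' ++ [argGet a "name"])]
        else (gs0 ++ [(t', ns')]) ++ [(argGet a "type", [argGet a "name"])] := by
      simp [goStep]
    rw [hstep]
    cases combine with
    | false =>
      rw [if_neg (by simp)]
      rw [ih]
      cases hG : goGroups false xs with
      | nil => simp [goGroups, hG, List.append_assoc]
      | cons g G' => simp [goGroups, hG, List.append_assoc]
    | true =>
      by_cases heq : t' = argGet a "type"
      · rw [if_pos (by simp [heq])]
        rw [ih]
        cases hG : goGroups true xs with
        | nil => simp [goGroups, hG, heq]
        | cons g G' =>
          obtain ⟨t, ms⟩ := g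
          by_cases ht : t = argGet a "type"
          · simp [goGroups, hG, ht, heq, List.append_assoc]
          · simp [goGroups, hG, ht, heq]
      · rw [if_neg (by simp [heq])]
        rw [ih]
        cases hG : goGroups true xs with
        | nil => simp [goGroups, hG, List.append_assoc, Ne.symm heq]
        | cons g G' =>
          obtain ⟨t, ms⟩ := g
          by_cases ht : t = argGet a "type"
          · simp [goGroups, hG, ht, List.append_assoc, Ne.symm heq]
          · simp [goGroups, hG, ht, List.append_assoc, Ne.symm heq]

theorem foldB_eq_goGroups (combine : Bool) (xs : List (List (String × String))) :
    xs.foldl (goStep combine) [] = goGroups combine xs := by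
  cases xs with
  | nil => rfl
  | cons a xs =>
    simp only [List.foldl_cons]
    have h0 : goStep combine [] a = [] ++ [(argGet a "type", [argGet a "name"])] := by
      simp [goStep]
    rw [h0, foldB_run]
    cases combine with
    | false =>
      cases hG : goGroups false xs with
      | nil => simp [goGroups, hG]
      | cons g G' => simp [goGroups, hG]
    | true =>
      cases hG : goGroups true xs with
      | nil => simp [goGroups, hG]
      | cons g G' =>
        obtain ⟨t, ms⟩ := g
        by_cases ht : t = argGet a "type"
        · simp [goGroups, hG, ht]
        · simp [goGroups, hG, ht]

theorem format_goGroups (combine : Bool) :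
    ∀ xs, PySem.Str.join ", " ((goGroups combine xs).map
        (fun g => PySem.Str.join ", " g.2 ++ " " ++ g.1)) = recA combine xs := by
  intro xs
  induction xs with
  | nil => simp [goGroups, recA, join_nil]
  | cons a xs ih =>
    cases xs with
    | nil => cases combine <;> simp [goGroups, recA, join_singleton]
    | cons b ys =>
      obtain ⟨ns, G', hG, hne⟩ := goGroups_head combine b ys
      cases combine with
      | false =>
        have hshape : goGroups false (a :: b :: ys) =
            (argGet a "type", [argGet a "name"]) :: goGroups false (b :: ys) := by
          rw [goGroups_cons, hG]; simp
        rw [hshape, List.map_cons, join_cons_ne_nil _ _ _ (by simp [hG]), ih, join_singleton]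
        simp [recA, String.append_assoc]
      | true =>
        by_cases ht : argGet b "type" = argGet a "type"
        · have hshape : goGroups true (a :: b :: ys) =
              (argGet a "type", argGet a "name" :: ns) :: G' := by
            rw [goGroups_cons, hG]; simp [ht]
          rw [hshape, format_merge _ _ _ _ hne, ← ht, ← hG, ih]
          simp [recA, ht, String.append_assoc]
        · have hshape : goGroups true (a :: b :: ys) =
              (argGet a "type", [argGet a "name"]) :: goGroups true (b :: ys) := by
            rw [goGroups_cons, hG]; simp [ht]
          rw [hshape, List.map_cons, join_cons_ne_nil _ _ _ (by simp [hG]), ih, join_singleton]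
          simp [recA, ht, String.append_assoc]

theorem alt_eq_recA (args : List (List (String × String))) (combine : Bool) :
    toGoArgs_alt args combine = recA combine args := by
  simp only [toGoArgs_alt, foldB_eq_goGroups, format_goGroups]

-- ===== VERDICT (by name: the statement is the Claim_ definition above) =====
theorem toGoArgs_spec : Claim_equal_toGoArgs := by
  intro args combine _ _
  unfold Spec_toGoArgs
  rw [toGoArgs_eq_recA, alt_eq_recA]
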